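-- pv_equiv track=rewrite | github.com/yuion55/tina | topomatrix_rna/stage1_contact_map.py | _extract_helices
-- ===== SOURCE A (Python) =====
-- def _extract_helices(bp_list: list[tuple[int, int]]) -> list[tuple[int, int]]:
--     """Extract helix spans from a list of base pairs.
--
--     A helix is a run of consecutive base pairs (i, j), (i+1, j-1), ...
--
--     Args:
--         bp_list: List of (i, j) base pairs with i < j.
--
--     Returns:
--         List of (start, end) helix spans.
--     """
--     if not bp_list:
--         return []
--     bp_set = set(bp_list)
--     sorted_bps = sorted(bp_list)
--     visited: set[tuple[int, int]] = set()
--     helices = []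
--     for (i, j) in sorted_bps:
--         if (i, j) in visited:
--             continue
--         # Extend helix
--         start_i, end_j = i, j
--         cur_i, cur_j = i, j
--         visited.add((cur_i, cur_j))
--         while (cur_i + 1, cur_j - 1) in bp_set and cur_j - 1 > cur_i + 1:
--             cur_i += 1
--             cur_j -= 1
--             visited.add((cur_i, cur_j))
--         helices.append((start_i, cur_i))
--     return helices
-- ===== SOURCE B (Python) =====
-- def _extract_helices(bp_list):
--     """Bucket pairs by anti-diagonal sum i+j, split each group's sorted i-values
--     into consecutive runs (a run edge i-1 -> i needs j > i), then sort the spans."""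
--     groups = {}
--     for (i, j) in bp_list:
--         s = i + j
--         if s not in groups:
--             groups[s] = set()
--         groups[s].add(i)
--     spans = []
--     for s, iset in groups.items():
--         ivals = sorted(iset)
--         start = prev = ivals[0]
--         for i in ivals[1:]:
--             if i == prev + 1 and s - i > i:
--                 prev = i
--             else:
--                 spans.append((start, s - start, prev))
--                 start = prev = i
--         spans.append((start, s - start, prev))
--     spans.sort(key=lambda t: (t[0], t[1]))
--     return [(a, e) for (a, b, e) in spans]
-- ===== Notes on version B (the rewrite author's own statement) =====
-- stated objective: alternative
-- what changed: B replaces A's sorted-scan-with-visited-set-and-forward-walk by a grouping algorithm: pairs are bucketed by their anti-diagonal sum i+j (invariant along a helix), each bucket's sorted i-values are split into consecutive runs respecting the j>i guard, and the resulting (start,end) spans are sorted; no pair-set membership walk and no visited set remain.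
import Mathlib
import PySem

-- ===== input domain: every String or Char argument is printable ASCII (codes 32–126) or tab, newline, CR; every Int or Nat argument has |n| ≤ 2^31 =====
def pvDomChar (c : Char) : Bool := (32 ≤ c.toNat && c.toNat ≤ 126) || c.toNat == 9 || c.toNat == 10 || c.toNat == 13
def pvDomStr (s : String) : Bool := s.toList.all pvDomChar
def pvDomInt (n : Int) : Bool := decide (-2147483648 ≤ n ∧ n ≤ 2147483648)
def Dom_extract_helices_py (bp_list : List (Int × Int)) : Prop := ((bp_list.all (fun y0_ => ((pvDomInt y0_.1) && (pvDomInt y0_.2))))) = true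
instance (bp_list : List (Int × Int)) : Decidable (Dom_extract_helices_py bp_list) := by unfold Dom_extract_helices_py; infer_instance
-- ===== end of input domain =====

-- B replaces A's visited-set scan and forward membership walk by a different algorithm:
-- bucket pairs by the anti-diagonal sum i+j, split each bucket's sorted i-values into
-- consecutive runs, and sort the spans (objective: alternative; similar cost).

-- ===== PORT A =====
-- the inner 'while' of A: extends the helix, adding each step to the visited set
def helWhileA (S : List (Int × Int)) (ci cj : Int) (v : PySem.Set (Int × Int)) :
    Int × Int × PySem.Set (Int × Int) :=
  if (ci + 1, cj - 1) ∈ S ∧ cj - 1 > ci + 1 then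
    helWhileA S (ci + 1) (cj - 1) (PySem.Set.add v (ci + 1, cj - 1))
  else (ci, cj, v)
termination_by (cj - ci).toNat
decreasing_by omega

def extract_helices_py (bp_list : List (Int × Int)) : List (Int × Int) :=
  if bp_list = [] then []
  else
    let bp_set := PySem.Set.ofList bp_list
    let sorted_bps := PySem.List.sorted2 bp_list Prod.fst Prod.snd
    (sorted_bps.foldl
      (fun st p =>
        if p ∈ st.1 then st
        else
          let r := helWhileA bp_set p.1 p.2 (PySem.Set.add st.1 p)
          (r.2.2, st.2 ++ [(p.1, r.1)]))
      (PySem.Set.empty, [])).2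

-- ===== PORT B =====
def extract_helices_py_alt (bp_list : List (Int × Int)) : List (Int × Int) :=
  let groups := bp_list.foldl
    (fun d p => PySem.Dict.modify d (p.1 + p.2) PySem.Set.empty (fun s => PySem.Set.add s p.1))
    PySem.Dict.empty
  let spans := (PySem.Dict.items groups).foldl
    (fun acc g =>
      match PySem.List.sorted g.2 (fun x => x) with
      | [] => acc          -- unreachable: every group is created with at least one element
      | i0 :: rest =>
        let st := rest.foldl
          (fun (st : List (Int × Int × Int) × Int × Int) i =>
            if i = st.2.2 + 1 ∧ g.1 - i > i then (st.1, st.2.1, i)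
            else (st.1 ++ [(st.2.1, g.1 - st.2.1, st.2.2)], i, i))
          (acc, i0, i0)
        st.1 ++ [(st.2.1, g.1 - st.2.1, st.2.2)])
    []
  (PySem.List.sorted2 spans (fun t => t.1) (fun t => t.2.1)).map (fun t => (t.1, t.2.2))

-- ===== PRECONDITION & SPEC =====
def Spec_extract_helices_py (bp_list : List (Int × Int)) (out : List (Int × Int)) : Prop := out = extract_helices_py_alt bp_list
instance (bp_list : List (Int × Int)) (out : List (Int × Int)) : Decidable (Spec_extract_helices_py bp_list out) := by unfold Spec_extract_helices_py; infer_instance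

-- ===== CLAIM (what is proved, stated in full; the proofs are below) =====
def Claim_equal_extract_helices_py : Prop := ∀ (bp_list : List (Int × Int)), Dom_extract_helices_py bp_list → Spec_extract_helices_py bp_list (extract_helices_py bp_list)

-- ===== LEMMAS AND PROOFS =====

-- the end of A's forward walk, without the visited set (proof-side abstraction)
def helWhileB (S : List (Int × Int)) (ci cj : Int) : Int :=
  if (ci + 1, cj - 1) ∈ S ∧ cj - 1 > ci + 1 then helWhileB S (ci + 1) (cj - 1) else ci
termination_by (cj - ci).toNat
decreasing_by omega

-- lexicographic strict order on pairs (Python's tuple '<')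
def pLt (p q : Int × Int) : Prop := p.1 < q.1 ∨ (p.1 = q.1 ∧ p.2 < q.2)

-- the Boolean comparator sorted2 uses with keys fst, snd
def pbefore (p q : Int × Int) : Bool :=
  decide (p.1 < q.1) || (!decide (q.1 < p.1) && decide (p.2 < q.2))

-- 'weakly before': the pairwise relation insertion sort guarantees
def pR (p q : Int × Int) : Prop := pbefore q p = false

-- '(i,j) is a continuation of the pair (i-1, j+1)' (exactly A's while-guard, seen from the successor)
def contp (S : List (Int × Int)) (p : Int × Int) : Prop := (p.1 - 1, p.2 + 1) ∈ S ∧ p.2 > p.1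

-- the head of p's helix run: walk backwards while the continuation condition holds
def hdp (S : List (Int × Int)) (p : Int × Int) : Int × Int :=
  if h : (p.1 - 1, p.2 + 1) ∈ S ∧ p.2 > p.1 then hdp S (p.1 - 1, p.2 + 1) else p
termination_by (S.filter (fun q => decide (p.2 - p.1 < q.2 - q.1))).length
decreasing_by
  have hss : S.filter (fun q => decide ((p.2 + 1) - (p.1 - 1) < q.2 - q.1))
      = (S.filter (fun q => decide (p.2 - p.1 < q.2 - q.1))).filter
          (fun q => decide ((p.2 + 1) - (p.1 - 1) < q.2 - q.1)) := by
    rw [List.filter_filter]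
    apply List.filter_congr
    intro x _
    by_cases hx : (p.2 + 1) - (p.1 - 1) < x.2 - x.1
    · simp [hx]; omega
    · simp [hx]
  rw [hss]
  apply List.length_filter_lt_length_iff_exists.mpr
  refine ⟨(p.1 - 1, p.2 + 1), ?_, ?_⟩
  · apply List.mem_filter.mpr
    exact ⟨h.1, by simp; omega⟩
  · simp

-- the forward chain of pairs A's while-loop visits starting at (ci, cj)
def chainL (S : List (Int × Int)) (ci cj : Int) : List (Int × Int) :=
  (ci, cj) :: (if (ci + 1, cj - 1) ∈ S ∧ cj - 1 > ci + 1 then chainL S (ci + 1) (cj - 1) else [])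
termination_by (cj - ci).toNat
decreasing_by omega

-- adjacent deduplication (duplicates in a sorted list are adjacent)
def dd : List (Int × Int) → List (Int × Int)
  | [] => []
  | [a] => [a]
  | a :: b :: t => if a = b then dd (b :: t) else a :: dd (b :: t)

-- A's loop body, named for the proofs (identical to the lambda in the port)
def stepA (S : List (Int × Int)) (st : PySem.Set (Int × Int) × List (Int × Int)) (p : Int × Int) :
    PySem.Set (Int × Int) × List (Int × Int) :=
  if p ∈ st.1 then st
  else
    let r := helWhileA S p.1 p.2 (PySem.Set.add st.1 p)
    (r.2.2, st.2 ++ [(p.1, r.1)])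

-- the visited-free head scan both programs are reduced to (proof-side midpoint)
def stepB (S : List (Int × Int)) (acc : List (Int × Int)) (p : Int × Int) : List (Int × Int) :=
  if (p.1 - 1, p.2 + 1) ∈ S ∧ p.2 > p.1 then acc
  else acc ++ [(p.1, helWhileB S p.1 p.2)]

def midScan (bp_list : List (Int × Int)) : List (Int × Int) :=
  (PySem.List.sorted2 (PySem.Set.ofList bp_list) Prod.fst Prod.snd).foldl
    (stepB (PySem.Set.ofList bp_list)) []

-- ---- basic facts ----

lemma pbefore_iff (p q : Int × Int) : pbefore p q = true ↔ pLt p q := by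
  simp [pbefore, pLt]; omega

lemma pR_iff (p q : Int × Int) : pR p q ↔ ¬ pLt q p := by
  unfold pR
  rw [← pbefore_iff]
  simp

lemma whileA_fst (S : List (Int × Int)) (ci cj : Int) (v : PySem.Set (Int × Int)) :
    (helWhileA S ci cj v).1 = helWhileB S ci cj := by
  fun_induction helWhileA S ci cj v with
  | case1 ci cj v h ih => rw [helWhileB, if_pos h]; exact ih
  | case2 ci cj v h => rw [helWhileB, if_neg h]

lemma whileA_mono (S : List (Int × Int)) (ci cj : Int) (v : PySem.Set (Int × Int)) (q : Int × Int)
    (h : q ∈ v) : q ∈ (helWhileA S ci cj v).2.2 := by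
  fun_induction helWhileA S ci cj v with
  | case1 ci cj v hg ih => exact ih ((PySem.Set.mem_add v _ q).mpr (Or.inl h))
  | case2 ci cj v hg => exact h

lemma whileA_vis (S : List (Int × Int)) (ci cj : Int) :
    ∀ (v : PySem.Set (Int × Int)) (q : Int × Int),
      q ∈ (helWhileA S ci cj (PySem.Set.add v (ci, cj))).2.2 ↔ q ∈ v ∨ q ∈ chainL S ci cj := by
  fun_induction chainL S ci cj with
  | case1 ci cj ih =>
    intro v q
    by_cases hg : (ci + 1, cj - 1) ∈ S ∧ cj - 1 > ci + 1
    · rw [helWhileA, if_pos hg, ih hg (PySem.Set.add v (ci, cj)) q, PySem.Set.mem_add,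
        if_pos hg, List.mem_cons]
      tauto
    · rw [helWhileA, if_neg hg, if_neg hg]
      simp [PySem.Set.mem_add]

-- ---- hdp facts ----

lemma hdp_of_not_cont {S : List (Int × Int)} {p : Int × Int} (h : ¬ contp S p) : hdp S p = p := by
  rw [hdp]; rw [dif_neg]; exact h

lemma hdp_of_cont {S : List (Int × Int)} {p : Int × Int} (h : contp S p) :
    hdp S p = hdp S (p.1 - 1, p.2 + 1) := by
  rw [hdp]; rw [dif_pos]; exact h

lemma hdp_not_cont (S : List (Int × Int)) (p : Int × Int) : ¬ contp S (hdp S p) := by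
  fun_induction hdp S p with
  | case1 p h ih => exact ih
  | case2 p h => exact h

lemma hdp_mem (S : List (Int × Int)) (p : Int × Int) : p ∈ S → hdp S p ∈ S := by
  fun_induction hdp S p with
  | case1 p h ih => intro _; exact ih h.1
  | case2 p h => exact fun hp => hp

lemma hdp_fst_le (S : List (Int × Int)) (p : Int × Int) : (hdp S p).1 ≤ p.1 := by
  fun_induction hdp S p with
  | case1 p h ih => simp at ih; omega
  | case2 p h => exact le_refl _

-- ---- chain facts ----

lemma chain_head (S : List (Int × Int)) (ci cj : Int) : (ci, cj) ∈ chainL S ci cj := by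
  rw [chainL]; exact List.mem_cons_self

lemma chain_sub (S : List (Int × Int)) (ci cj : Int) :
    (ci, cj) ∈ S → ∀ q ∈ chainL S ci cj, q ∈ S ∧ hdp S q = hdp S (ci, cj) := by
  fun_induction chainL S ci cj with
  | case1 ci cj ih =>
    intro h q hq
    rcases List.mem_cons.mp hq with he | ht
    · exact ⟨he ▸ h, by rw [he]⟩
    · by_cases hg : (ci + 1, cj - 1) ∈ S ∧ cj - 1 > ci + 1
      · rw [if_pos hg] at ht
        obtain ⟨h1, h2⟩ := ih hg hg.1 q ht
        refine ⟨h1, ?_⟩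
        rw [h2]
        have hc : contp S (ci + 1, cj - 1) := ⟨by simpa using h, by simp; omega⟩
        rw [hdp_of_cont hc]
        simp
      · rw [if_neg hg] at ht
        exact absurd ht (List.not_mem_nil)

lemma chain_step (S : List (Int × Int)) (ci cj : Int) :
    ∀ x ∈ chainL S ci cj, ((x.1 + 1, x.2 - 1) ∈ S ∧ x.2 - 1 > x.1 + 1) →
      (x.1 + 1, x.2 - 1) ∈ chainL S ci cj := by
  fun_induction chainL S ci cj with
  | case1 ci cj ih =>
    intro x hx hgx
    rcases List.mem_cons.mp hx with he | ht
    · subst he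
      rw [chainL]
      refine List.mem_cons_of_mem _ ?_
      rw [if_pos hgx]
      rw [chainL]
      exact List.mem_cons_self
    · by_cases hg : (ci + 1, cj - 1) ∈ S ∧ cj - 1 > ci + 1
      · rw [if_pos hg] at ht
        exact List.mem_cons_of_mem _ (by rw [if_pos hg]; exact ih hg x ht hgx)
      · rw [if_neg hg] at ht
        exact absurd ht (List.not_mem_nil)

lemma chain_of_hd (S : List (Int × Int)) (ci cj : Int) (q : Int × Int) :
    q ∈ S → hdp S q = (ci, cj) → q ∈ chainL S ci cj := by
  fun_induction hdp S q with
  | case1 q h ih =>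
    intro hqS he
    have hp := ih h.1 he
    have hst := chain_step S ci cj (q.1 - 1, q.2 + 1) hp (by simpa using ⟨hqS, by omega⟩)
    simpa using hst
  | case2 q h =>
    intro hqS he
    rw [he]
    exact chain_head S ci cj

lemma chain_mem_iff {S : List (Int × Int)} {ci cj : Int} (h : (ci, cj) ∈ S)
    (hnc : ¬ contp S (ci, cj)) (q : Int × Int) :
    q ∈ chainL S ci cj ↔ q ∈ S ∧ hdp S q = (ci, cj) := by
  constructor
  · intro hq
    obtain ⟨h1, h2⟩ := chain_sub S ci cj h q hq
    exact ⟨h1, by rw [h2, hdp_of_not_cont hnc]⟩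
  · rintro ⟨h1, h2⟩
    exact chain_of_hd S ci cj q h1 h2

-- ---- sortedness ----

lemma pR_of_pLt {a b : Int × Int} (h : pLt a b) : pR a b := by
  rw [pR_iff]; unfold pLt at *; omega

lemma pR_trans_lt {x y z : Int × Int} (h1 : pLt x y) (h2 : pR y z) : pR x z := by
  rw [pR_iff] at *; unfold pLt at *; omega

lemma pLt_of_pR_ne {a b : Int × Int} (h : pR a b) (hne : a ≠ b) : pLt a b := by
  rw [pR_iff] at h
  have hne' : ¬ (a.1 = b.1 ∧ a.2 = b.2) := by
    intro ⟨e1, e2⟩; exact hne (Prod.ext e1 e2)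
  unfold pLt at *; omega

lemma pLt_le_trans {a b x : Int × Int} (h1 : pLt a b) (h2 : pR b x) : pLt a x := by
  rw [pR_iff] at h2; unfold pLt at *; omega

lemma insertBy_pairwise (x : Int × Int) (acc : List (Int × Int)) (h : acc.Pairwise pR) :
    (PySem.List.insertBy pbefore x acc).Pairwise pR := by
  induction acc with
  | nil => simp [PySem.List.insertBy]
  | cons y ys ih =>
    rcases List.pairwise_cons.mp h with ⟨hy, hys⟩
    rw [PySem.List.insertBy]
    by_cases hb : pbefore x y = true
    · rw [if_pos hb]
      have hxy : pLt x y := (pbefore_iff x y).mp hb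
      refine List.pairwise_cons.mpr ⟨?_, h⟩
      intro z hz
      rcases List.mem_cons.mp hz with he | ht
      · exact he ▸ pR_of_pLt hxy
      · exact pR_trans_lt hxy (hy z ht)
    · rw [if_neg hb]
      refine List.pairwise_cons.mpr ⟨?_, ih hys⟩
      intro z hz
      rcases (PySem.List.mem_insertBy pbefore x z ys).mp hz with he | ht
      · subst he; exact Bool.eq_false_iff.mpr hb
      · exact hy z ht

lemma foldl_insertBy_pairwise (xs : List (Int × Int)) :
    ∀ acc : List (Int × Int), acc.Pairwise pR →
      (xs.foldl (fun acc x => PySem.List.insertBy pbefore x acc) acc).Pairwise pR := by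
  intro acc h
  induction xs generalizing acc with
  | nil => exact h
  | cons y ys ih => exact ih _ (insertBy_pairwise y acc h)

lemma sorted2_eq (xs : List (Int × Int)) :
    PySem.List.sorted2 xs Prod.fst Prod.snd
      = xs.foldl (fun acc x => PySem.List.insertBy pbefore x acc) [] := rfl

lemma sorted2_pairwise (xs : List (Int × Int)) :
    (PySem.List.sorted2 xs Prod.fst Prod.snd).Pairwise pR := by
  rw [sorted2_eq]
  exact foldl_insertBy_pairwise xs [] (List.Pairwise.nil)

lemma pairwise_lt_of_pairwise_pR_nodup {l : List (Int × Int)} (h : l.Pairwise pR)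
    (hn : l.Nodup) : l.Pairwise pLt := by
  have := h.and hn
  apply this.imp
  rintro a b ⟨h1, h2⟩
  rw [pR_iff] at h1
  unfold pLt at *
  have hne : ¬ (a.1 = b.1 ∧ a.2 = b.2) := by
    intro ⟨e1, e2⟩; exact h2 (Prod.ext e1 e2)
  omega

lemma nodup_of_pairwise_lt {l : List (Int × Int)} (h : l.Pairwise pLt) : l.Nodup := by
  apply h.imp
  intro a b hab
  unfold pLt at hab
  intro he; subst he; omega

-- ---- dd facts ----

lemma mem_dd (l : List (Int × Int)) (x : Int × Int) : x ∈ dd l ↔ x ∈ l := by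
  fun_induction dd l with
  | case1 => rfl
  | case2 a => rfl
  | case3 b t ih => rw [ih]; simp
  | case4 a b t hab ih => simp [ih]

lemma dd_pairwise_lt (l : List (Int × Int)) : l.Pairwise pR → (dd l).Pairwise pLt := by
  fun_induction dd l with
  | case1 => intro _; exact List.Pairwise.nil
  | case2 a => intro _; simp
  | case3 b t ih => intro h; exact ih (List.pairwise_cons.mp h).2
  | case4 a b t hab ih =>
    intro h
    rcases List.pairwise_cons.mp h with ⟨ha, ht⟩
    refine List.pairwise_cons.mpr ⟨?_, ih ht⟩
    intro z hz
    have hzm : z ∈ b :: t := (mem_dd (b :: t) z).mp hz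
    have hab' : pLt a b := pLt_of_pR_ne (ha b List.mem_cons_self) hab
    rcases List.mem_cons.mp hzm with he | hzt
    · exact he ▸ hab'
    · exact pLt_le_trans hab' ((List.pairwise_cons.mp ht).1 z hzt)

lemma stepA_mem_self (S : List (Int × Int)) (st : PySem.Set (Int × Int) × List (Int × Int))
    (p : Int × Int) : p ∈ (stepA S st p).1 := by
  unfold stepA
  by_cases h : p ∈ st.1
  · simp [h]
  · simp only [h, if_false]
    exact whileA_mono S p.1 p.2 _ p ((PySem.Set.mem_add st.1 p p).mpr (Or.inr rfl))

lemma stepA_skip (S : List (Int × Int)) (st : PySem.Set (Int × Int) × List (Int × Int))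
    (p : Int × Int) (h : p ∈ st.1) : stepA S st p = st := by
  unfold stepA; simp [h]

lemma foldl_stepA_dd (S : List (Int × Int)) (l : List (Int × Int)) :
    ∀ st : PySem.Set (Int × Int) × List (Int × Int),
      l.foldl (stepA S) st = (dd l).foldl (stepA S) st := by
  fun_induction dd l with
  | case1 => intro st; rfl
  | case2 a => intro st; rfl
  | case3 b t ih =>
    intro st
    simp only [List.foldl_cons]
    rw [stepA_skip S (stepA S st b) b (stepA_mem_self S st b)]
    have h2 := ih st
    simp only [List.foldl_cons] at h2
    exact h2
  | case4 a b t hab ih =>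
    intro st
    simp only [List.foldl_cons]
    exact ih (stepA S st a)

-- ---- the main loop lemma (A reduced to the head scan midScan) ----

lemma main_loop (S : List (Int × Int)) (L : List (Int × Int)) :
    ∀ (v : PySem.Set (Int × Int)) (h : List (Int × Int)),
      (∀ q ∈ L, q ∈ S) → L.Pairwise pLt →
      (∀ q : Int × Int, q ∈ v ↔ (q ∈ S ∧ hdp S q ∉ L)) →
      (L.foldl (stepA S) (v, h)).2 = L.foldl (stepB S) h := by
  induction L with
  | nil => intro v h _ _ _; rfl
  | cons p rest ih =>
    intro v h hsub hsort hv
    rcases List.pairwise_cons.mp hsort with ⟨hp_rest, hrest⟩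
    have hpS : p ∈ S := hsub p List.mem_cons_self
    have hp_notin_rest : p ∉ rest := by
      intro hmem
      have := hp_rest p hmem
      unfold pLt at this; omega
    by_cases hc : contp S p
    · -- continuation: A skips via visited, B skips via the head test
      have hfst : (hdp S p).1 < p.1 := by
        rw [hdp_of_cont hc]
        have := hdp_fst_le S (p.1 - 1, p.2 + 1)
        simp at this; omega
      have hpv : p ∈ v := by
        rw [hv p]
        refine ⟨hpS, ?_⟩
        intro hmem
        rcases List.mem_cons.mp hmem with he | ht
        · rw [he] at hfst; omega
        · have := hp_rest _ ht
          unfold pLt at this; omega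
      have hne_hd : ∀ q : Int × Int, hdp S q ≠ p := by
        intro q he
        exact hdp_not_cont S q (he ▸ hc)
      simp only [List.foldl_cons]
      rw [stepA_skip S (v, h) p hpv]
      have hBskip : stepB S h p = h := by
        unfold stepB contp at *
        rw [if_pos hc]
      rw [hBskip]
      apply ih v h (fun q hq => hsub q (List.mem_cons_of_mem _ hq)) hrest
      intro q
      rw [hv q]
      constructor
      · rintro ⟨h1, h2⟩
        exact ⟨h1, fun hm => h2 (List.mem_cons_of_mem _ hm)⟩
      · rintro ⟨h1, h2⟩
        refine ⟨h1, ?_⟩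
        intro hm
        rcases List.mem_cons.mp hm with he | ht
        · exact hne_hd q he
        · exact h2 ht
    · -- head: A processes it, B appends the same span
      have hpv : p ∉ v := by
        rw [hv p]
        rintro ⟨_, h2⟩
        exact h2 (by rw [hdp_of_not_cont hc]; exact List.mem_cons_self)
      simp only [List.foldl_cons]
      have hAstep : stepA S (v, h) p
          = ((helWhileA S p.1 p.2 (PySem.Set.add v p)).2.2,
             h ++ [(p.1, helWhileB S p.1 p.2)]) := by
        unfold stepA
        rw [if_neg hpv]
        show ((helWhileA S p.1 p.2 (PySem.Set.add v p)).2.2,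
              h ++ [(p.1, (helWhileA S p.1 p.2 (PySem.Set.add v p)).1)]) = _
        rw [whileA_fst]
      have hBstep : stepB S h p = h ++ [(p.1, helWhileB S p.1 p.2)] := by
        unfold stepB contp at *
        rw [if_neg hc]
      rw [hAstep, hBstep]
      apply ih _ _ (fun q hq => hsub q (List.mem_cons_of_mem _ hq)) hrest
      intro q
      have hvis := whileA_vis S p.1 p.2 v q
      have hchain := chain_mem_iff (S := S) (ci := p.1) (cj := p.2) hpS hc q
      rw [show (PySem.Set.add v p) = (PySem.Set.add v (p.1, p.2)) from rfl]
      rw [hvis, hchain, hv q]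
      have hp_not_rest : (p.1, p.2) ∉ rest := hp_notin_rest
      constructor
      · rintro (⟨h1, h2⟩ | ⟨h1, h2⟩)
        · exact ⟨h1, fun hm => h2 (List.mem_cons_of_mem _ hm)⟩
        · exact ⟨h1, h2 ▸ hp_not_rest⟩
      · rintro ⟨h1, h2⟩
        by_cases he : hdp S q = (p.1, p.2)
        · exact Or.inr ⟨h1, he⟩
        · refine Or.inl ⟨h1, ?_⟩
          intro hm
          rcases List.mem_cons.mp hm with hh | ht
          · exact he hh
          · exact h2 ht

theorem A_eq_mid (bp_list : List (Int × Int)) : extract_helices_py bp_list = midScan bp_list := by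
  by_cases hnil : bp_list = []
  · subst hnil; rfl
  · unfold extract_helices_py midScan
    rw [if_neg hnil]
    have hA : (PySem.List.sorted2 bp_list Prod.fst Prod.snd).Pairwise pR :=
      sorted2_pairwise bp_list
    have hBpr : (PySem.List.sorted2 (PySem.Set.ofList bp_list) Prod.fst Prod.snd).Pairwise pR :=
      sorted2_pairwise _
    have hBnd : (PySem.List.sorted2 (PySem.Set.ofList bp_list) Prod.fst Prod.snd).Nodup :=
      (PySem.List.sorted2_perm _ _ _ _).symm.nodup (PySem.Set.nodup_ofList bp_list)
    have hBlt := pairwise_lt_of_pairwise_pR_nodup hBpr hBnd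
    have hddlt := dd_pairwise_lt _ hA
    have hmemB : ∀ x : Int × Int,
        x ∈ PySem.List.sorted2 (PySem.Set.ofList bp_list) Prod.fst Prod.snd
          ↔ x ∈ PySem.Set.ofList bp_list :=
      fun x => (PySem.List.sorted2_perm _ _ _ _).mem_iff
    have hmem : ∀ x : Int × Int,
        x ∈ dd (PySem.List.sorted2 bp_list Prod.fst Prod.snd)
          ↔ x ∈ PySem.List.sorted2 (PySem.Set.ofList bp_list) Prod.fst Prod.snd := by
      intro x
      rw [mem_dd, (PySem.List.sorted2_perm _ _ _ _).mem_iff, hmemB,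
        PySem.Set.mem_ofList]
    have hperm := (List.perm_ext_iff_of_nodup (nodup_of_pairwise_lt hddlt) hBnd).mpr hmem
    have heq : dd (PySem.List.sorted2 bp_list Prod.fst Prod.snd)
        = PySem.List.sorted2 (PySem.Set.ofList bp_list) Prod.fst Prod.snd := by
      refine List.Perm.eq_of_pairwise ?_ hddlt hBlt hperm
      intro a b _ _ h1 h2
      exfalso; unfold pLt at *; omega
    show ((PySem.List.sorted2 bp_list Prod.fst Prod.snd).foldl
        (stepA (PySem.Set.ofList bp_list)) (PySem.Set.empty, [])).2 = _
    rw [foldl_stepA_dd, heq]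
    rw [main_loop (PySem.Set.ofList bp_list) _ _ _
      (fun q hq => (hmemB q).mp hq) hBlt ?_]
    · intro q
      constructor
      · intro hq
        exact absurd hq (List.not_mem_nil)
      · rintro ⟨h1, h2⟩
        exact (h2 ((hmemB _).mpr (hdp_mem _ q h1))).elim


-- ---- B-side: grouping by anti-diagonal sum ----

def gstep (d : PySem.Dict Int (PySem.Set Int)) (p : Int × Int) : PySem.Dict Int (PySem.Set Int) :=
  PySem.Dict.modify d (p.1 + p.2) PySem.Set.empty (fun s => PySem.Set.add s p.1)

def runs (s start prev : Int) : List Int → List (Int × Int × Int)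
  | [] => [(start, s - start, prev)]
  | i :: t =>
    if i = prev + 1 ∧ s - i > i then runs s start i t
    else (start, s - start, prev) :: runs s i i t

def bstep (s : Int) (st : List (Int × Int × Int) × Int × Int) (i : Int) :
    List (Int × Int × Int) × Int × Int :=
  if i = st.2.2 + 1 ∧ s - i > i then (st.1, st.2.1, i)
  else (st.1 ++ [(st.2.1, s - st.2.1, st.2.2)], i, i)

def bloop (s : Int) (st : List (Int × Int × Int) × Int × Int) (t : List Int) :
    List (Int × Int × Int) :=
  let r := t.foldl (bstep s) st
  r.1 ++ [(r.2.1, s - r.2.1, r.2.2)]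

def chunk (g : Int × PySem.Set Int) : List (Int × Int × Int) :=
  match PySem.List.sorted g.2 (fun x => x) with
  | [] => []
  | i0 :: rest => runs g.1 i0 i0 rest

lemma getD_gfold (l : List (Int × Int)) :
    ∀ (d : PySem.Dict Int (PySem.Set Int)) (s i : Int),
      i ∈ (l.foldl gstep d).getD s PySem.Set.empty ↔
        i ∈ d.getD s PySem.Set.empty ∨ (i, s - i) ∈ l := by
  induction l with
  | nil => intro d s i; simp
  | cons p t ih =>
    intro d s i
    simp only [List.foldl_cons]
    rw [ih]
    have hg : (gstep d p).getD s PySem.Set.empty =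
        if s = p.1 + p.2 then PySem.Set.add (d.getD (p.1 + p.2) PySem.Set.empty) p.1
        else d.getD s PySem.Set.empty := by
      unfold gstep; rw [PySem.Dict.getD_modify]
    rw [hg]
    by_cases hs : s = p.1 + p.2
    · rw [if_pos hs, PySem.Set.mem_add]
      have hpe : (i, s - i) = p ↔ i = p.1 := by
        constructor
        · intro he; rw [← he]
        · intro he; obtain ⟨a, b⟩ := p; simp at he ⊢; constructor <;> omega
      subst hs
      simp only [List.mem_cons, hpe]
      tauto
    · rw [if_neg hs]
      have hpe : (i, s - i) ≠ p := by
        intro he; apply hs; rw [← he]; ring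
      simp only [List.mem_cons, hpe, false_or]

lemma nodup_gfold (l : List (Int × Int)) :
    ∀ (d : PySem.Dict Int (PySem.Set Int)),
      (∀ s, (d.getD s PySem.Set.empty).Nodup) →
      ∀ s, ((l.foldl gstep d).getD s PySem.Set.empty).Nodup := by
  induction l with
  | nil => intro d h s; exact h s
  | cons p t ih =>
    intro d h s
    simp only [List.foldl_cons]
    apply ih
    intro s'
    have hg : (gstep d p).getD s' PySem.Set.empty =
        if s' = p.1 + p.2 then PySem.Set.add (d.getD (p.1 + p.2) PySem.Set.empty) p.1
        else d.getD s' PySem.Set.empty := by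
      unfold gstep; rw [PySem.Dict.getD_modify]
    rw [hg]
    split
    · exact PySem.Set.nodup_add _ _ (h _)
    · exact h s'

lemma keys_gfold (l : List (Int × Int)) :
    (l.foldl gstep PySem.Dict.empty).keys = PySem.Set.ofList (l.map (fun p => p.1 + p.2)) := by
  rw [show gstep = (fun (d : PySem.Dict Int (PySem.Set Int)) (x : Int × Int) =>
      PySem.Dict.modify d (x.1 + x.2) PySem.Set.empty (fun s => PySem.Set.add s x.1)) from rfl]
  rw [PySem.Dict.keys_foldl_modify_key]
  rw [show (PySem.Dict.empty : PySem.Dict Int (PySem.Set Int)).keys = [] from rfl]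
  rw [PySem.Set.update_nil_left]

lemma nodup_keys_gfold (l : List (Int × Int)) :
    (l.foldl gstep PySem.Dict.empty).keys.Nodup := by
  rw [keys_gfold]
  exact PySem.Set.nodup_ofList _

lemma bloop_runs (s : Int) (t : List Int) :
    ∀ acc start prev, bloop s (acc, start, prev) t = acc ++ runs s start prev t := by
  induction t with
  | nil => intro acc start prev; simp [bloop, runs]
  | cons i t ih =>
    intro acc start prev
    have hb : bstep s (acc, start, prev) i =
        if i = prev + 1 ∧ s - i > i then (acc, start, i)
        else (acc ++ [(start, s - start, prev)], i, i) := rfl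
    by_cases h : i = prev + 1 ∧ s - i > i
    · show bloop s (bstep s (acc, start, prev) i) t = _
      rw [hb, if_pos h, ih, runs, if_pos h]
    · show bloop s (bstep s (acc, start, prev) i) t = _
      rw [hb, if_neg h, ih, runs, if_neg h, List.append_assoc]
      rfl


-- ---- the forward walk computed from group data ----

lemma wEnd_eq (S : List (Int × Int)) (M : List Int) (s : Int)
    (hM : ∀ k : Int, ((k, s - k) ∈ S ↔ k ∈ M)) (e : Int)
    (hstop : ¬((e + 1) ∈ M ∧ s - (e + 1) > e + 1)) :
    ∀ (n : Nat) (ci : Int), ci ≤ e → (e - ci).toNat = n →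
      (∀ k, ci < k → k ≤ e → k ∈ M ∧ s - k > k) →
      helWhileB S ci (s - ci) = e := by
  intro n
  induction n with
  | zero =>
    intro ci h1 h2 _
    have hce : ci = e := by omega
    subst hce
    rw [helWhileB, if_neg]
    rintro ⟨hmem, hgt⟩
    apply hstop
    constructor
    · rw [← hM]
      convert hmem using 2
      omega
    · omega
  | succ n ih =>
    intro ci h1 h2 hk
    have hlt : ci < e := by omega
    obtain ⟨hm, hg⟩ := hk (ci + 1) (by omega) (by omega)
    rw [helWhileB, if_pos]
    · have hrw : s - ci - 1 = s - (ci + 1) := by omega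
      rw [hrw]
      exact ih (ci + 1) (by omega) (by omega) (fun k hk1 hk2 => hk k (by omega) hk2)
    · constructor
      · have := (hM (ci + 1)).mpr hm
        convert this using 2
        omega
      · omega

lemma split_sorted {M u t : List Int} {prev : Int} (hM : M.Pairwise (· < ·))
    (he : M = u ++ prev :: t) :
    (∀ x ∈ t, prev < x) ∧ (∀ m ∈ M, prev < m → m ∈ t) ∧ t.Pairwise (· < ·) := by
  subst he
  rw [List.pairwise_append] at hM
  obtain ⟨hu, hpt, hcross⟩ := hM
  rw [List.pairwise_cons] at hpt
  obtain ⟨hp, ht⟩ := hpt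
  refine ⟨hp, ?_, ht⟩
  intro m hm hgt
  rcases List.mem_append.mp hm with h | h
  · exact absurd (hcross m h prev List.mem_cons_self) (by omega)
  · rcases List.mem_cons.mp h with h | h
    · omega
    · exact h

lemma runs_spec (S : List (Int × Int)) (M : List Int) (s : Int)
    (hM : ∀ k : Int, ((k, s - k) ∈ S ↔ k ∈ M)) (hsort : M.Pairwise (· < ·)) :
    ∀ (t u : List Int) (start prev : Int),
      M = u ++ prev :: t → start ≤ prev →
      (∀ k, start < k → k ≤ prev → k ∈ M ∧ s - k > k) →
      runs s start prev t =
        (start, s - start, helWhileB S start (s - start)) ::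
          (t.filter (fun a => !decide ((a - 1) ∈ M ∧ s - a > a))).map
            (fun a => (a, s - a, helWhileB S a (s - a))) := by
  intro t
  induction t with
  | nil =>
    intro u start prev he hle hch
    obtain ⟨hgt, hmt, _⟩ := split_sorted hsort he
    have hstop : ¬((prev + 1) ∈ M ∧ s - (prev + 1) > prev + 1) := by
      rintro ⟨h1, _⟩
      exact absurd (hmt _ h1 (by omega)) (List.not_mem_nil)
    have hw : helWhileB S start (s - start) = prev :=
      wEnd_eq S M s hM prev hstop (prev - start).toNat start hle rfl hch
    rw [runs, hw]
    simp
  | cons i t' ih =>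
    intro u start prev he hle hch
    obtain ⟨hgt, hmt, hts⟩ := split_sorted hsort he
    have hip : prev < i := hgt i List.mem_cons_self
    have hiM : i ∈ M := by rw [he]; simp
    have ht'i : ∀ x ∈ t', i < x := (List.pairwise_cons.mp hts).1
    have he' : M = (u ++ [prev]) ++ i :: t' := by rw [he]; simp
    by_cases hj : i = prev + 1 ∧ s - i > i
    · rw [runs, if_pos hj]
      rw [ih (u ++ [prev]) start i he' (by omega) ?_]
      · have hdrop : (!decide ((i - 1) ∈ M ∧ s - i > i)) = false := by
          simp only [Bool.not_eq_false', decide_eq_true_eq]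
          exact ⟨by rw [show i - 1 = prev by omega]; rw [he]; simp, hj.2⟩
        rw [List.filter_cons, hdrop]
        simp
      · intro k h1 h2
        by_cases hk : k ≤ prev
        · exact hch k h1 hk
        · have hki : k = i := by omega
          subst hki
          exact ⟨hiM, hj.2⟩
    · rw [runs, if_neg hj]
      have hstop : ¬((prev + 1) ∈ M ∧ s - (prev + 1) > prev + 1) := by
        rintro ⟨h1, h2⟩
        have h3 := hmt _ h1 (by omega)
        rcases List.mem_cons.mp h3 with h4 | h4
        · exact hj ⟨by omega, by omega⟩
        · have := ht'i _ h4
          omega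
      have hw : helWhileB S start (s - start) = prev :=
        wEnd_eq S M s hM prev hstop (prev - start).toNat start hle rfl hch
      rw [ih (u ++ [prev]) i i he' le_rfl (by intro k h1 h2; omega)]
      have hkeep : (!decide ((i - 1) ∈ M ∧ s - i > i)) = true := by
        simp only [Bool.not_eq_true', decide_eq_false_iff_not]
        rintro ⟨hmem, hgt2⟩
        by_cases hpe : i - 1 = prev
        · exact hj ⟨by omega, hgt2⟩
        · have h3 := hmt _ hmem (by omega)
          rcases List.mem_cons.mp h3 with h4 | h4
          · omega
          · have := ht'i _ h4
            omega
      rw [List.filter_cons, hkeep]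
      rw [hw]
      simp

lemma sorted_strict (v : List Int) (h : v.Nodup) :
    (PySem.List.sorted v (fun x => x)).Pairwise (· < ·) := by
  have hp := PySem.List.sorted_pairwise (xs := v) (key := fun x => x)
  have hn : (PySem.List.sorted v (fun x => x)).Nodup :=
    (PySem.List.sorted_perm v (fun x => x) false).symm.nodup h
  have := hp.and hn
  apply this.imp
  rintro a b ⟨h1, h2⟩
  omega

lemma chunk_spec (S : List (Int × Int)) (g : Int × PySem.Set Int) (hnd : g.2.Nodup)
    (hM : ∀ k : Int, ((k, g.1 - k) ∈ S ↔ k ∈ g.2)) :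
    chunk g = ((PySem.List.sorted g.2 (fun x => x)).filter
        (fun a => !decide ((a - 1) ∈ PySem.List.sorted g.2 (fun x => x) ∧ g.1 - a > a))).map
      (fun a => (a, g.1 - a, helWhileB S a (g.1 - a))) := by
  have hM' : ∀ k : Int, ((k, g.1 - k) ∈ S ↔ k ∈ PySem.List.sorted g.2 (fun x => x)) := by
    intro k
    rw [PySem.List.mem_sorted]
    exact hM k
  have hsort := sorted_strict g.2 hnd
  unfold chunk
  cases hs : PySem.List.sorted g.2 (fun x => x) with
  | nil => simp
  | cons i0 rest =>
    rw [hs] at hM' hsort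
    have hr := runs_spec S (i0 :: rest) g.1 hM' hsort rest [] i0 i0 rfl le_rfl
      (by intro k h1 h2; omega)
    show runs g.1 i0 i0 rest = _
    rw [hr]
    have hkeep : (!decide ((i0 - 1) ∈ i0 :: rest ∧ g.1 - i0 > i0)) = true := by
      simp only [Bool.not_eq_true', decide_eq_false_iff_not]
      rintro ⟨hmem, _⟩
      rcases List.mem_cons.mp hmem with h4 | h4
      · omega
      · have := (List.pairwise_cons.mp hsort).1 _ h4
        omega
    rw [List.filter_cons, hkeep]
    simp


-- ---- triple comparator (final sort of the spans) ----

def qLt (x y : Int × Int × Int) : Prop := x.1 < y.1 ∨ (x.1 = y.1 ∧ x.2.1 < y.2.1)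

def qbefore (x y : Int × Int × Int) : Bool :=
  decide (x.1 < y.1) || (!decide (y.1 < x.1) && decide (x.2.1 < y.2.1))

def qR (x y : Int × Int × Int) : Prop := qbefore y x = false

lemma qbefore_iff (p q : Int × Int × Int) : qbefore p q = true ↔ qLt p q := by
  simp [qbefore, qLt]; omega

lemma qR_iff (p q : Int × Int × Int) : qR p q ↔ ¬ qLt q p := by
  unfold qR
  rw [← qbefore_iff]
  simp

lemma qR_of_qLt {a b : Int × Int × Int} (h : qLt a b) : qR a b := by
  rw [qR_iff]; unfold qLt at *; omega

lemma qR_trans_lt {x y z : Int × Int × Int} (h1 : qLt x y) (h2 : qR y z) : qR x z := by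
  rw [qR_iff] at *; unfold qLt at *; omega

lemma insertBy_pairwise3 (x : Int × Int × Int) (acc : List (Int × Int × Int))
    (h : acc.Pairwise qR) : (PySem.List.insertBy qbefore x acc).Pairwise qR := by
  induction acc with
  | nil => simp [PySem.List.insertBy]
  | cons y ys ih =>
    rcases List.pairwise_cons.mp h with ⟨hy, hys⟩
    rw [PySem.List.insertBy]
    by_cases hb : qbefore x y = true
    · rw [if_pos hb]
      have hxy : qLt x y := (qbefore_iff x y).mp hb
      refine List.pairwise_cons.mpr ⟨?_, h⟩
      intro z hz
      rcases List.mem_cons.mp hz with he | ht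
      · exact he ▸ qR_of_qLt hxy
      · exact qR_trans_lt hxy (hy z ht)
    · rw [if_neg hb]
      refine List.pairwise_cons.mpr ⟨?_, ih hys⟩
      intro z hz
      rcases (PySem.List.mem_insertBy qbefore x z ys).mp hz with he | ht
      · subst he; exact Bool.eq_false_iff.mpr hb
      · exact hy z ht

lemma sorted2_pairwise3 (xs : List (Int × Int × Int)) :
    (PySem.List.sorted2 xs (fun t => t.1) (fun t => t.2.1)).Pairwise qR := by
  rw [show PySem.List.sorted2 xs (fun t => t.1) (fun t => t.2.1)
      = xs.foldl (fun acc x => PySem.List.insertBy qbefore x acc) [] from rfl]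
  have : ∀ acc : List (Int × Int × Int), acc.Pairwise qR →
      (xs.foldl (fun acc x => PySem.List.insertBy qbefore x acc) acc).Pairwise qR := by
    intro acc h
    induction xs generalizing acc with
    | nil => exact h
    | cons y ys ih => exact ih _ (insertBy_pairwise3 y acc h)
  exact this [] List.Pairwise.nil

-- ---- the spans list and its characterization ----

lemma alt_eq (bp_list : List (Int × Int)) :
    extract_helices_py_alt bp_list =
      (PySem.List.sorted2
        ((PySem.Dict.items (bp_list.foldl gstep PySem.Dict.empty)).flatMap chunk)
        (fun t => t.1) (fun t => t.2.1)).map (fun t => (t.1, t.2.2)) := by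
  show (PySem.List.sorted2
      ((PySem.Dict.items (bp_list.foldl gstep PySem.Dict.empty)).foldl
        (fun acc g =>
          match PySem.List.sorted g.2 (fun x => x) with
          | [] => acc
          | i0 :: rest => bloop g.1 (acc, i0, i0) rest) [])
      (fun t => t.1) (fun t => t.2.1)).map (fun t => (t.1, t.2.2)) = _
  have hb : ∀ (acc : List (Int × Int × Int)) (g : Int × PySem.Set Int),
      (match PySem.List.sorted g.2 (fun x => x) with
       | [] => acc
       | i0 :: rest => bloop g.1 (acc, i0, i0) rest) = acc ++ chunk g := by
    intro acc g
    unfold chunk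
    cases hs : PySem.List.sorted g.2 (fun x => x) with
    | nil => simp
    | cons i0 rest => exact bloop_runs g.1 rest acc i0 i0
  have hfold : ∀ (l : List (Int × PySem.Set Int)) (acc : List (Int × Int × Int)),
      l.foldl (fun acc g =>
          match PySem.List.sorted g.2 (fun x => x) with
          | [] => acc
          | i0 :: rest => bloop g.1 (acc, i0, i0) rest) acc = acc ++ l.flatMap chunk := by
    intro l
    induction l with
    | nil => intro acc; simp
    | cons g l ih =>
      intro acc
      simp only [List.foldl_cons, List.flatMap_cons]
      rw [hb, ih, List.append_assoc]
  rw [hfold]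
  rfl

lemma mem_spans (bp_list : List (Int × Int)) (x : Int × Int × Int) :
    x ∈ (PySem.Dict.items (bp_list.foldl gstep PySem.Dict.empty)).flatMap chunk ↔
      ∃ p : Int × Int, p ∈ bp_list ∧ ¬ contp (PySem.Set.ofList bp_list) p ∧
        x = (p.1, p.2, helWhileB (PySem.Set.ofList bp_list) p.1 p.2) := by
  have hkn := nodup_keys_gfold bp_list
  have hval : ∀ g ∈ PySem.Dict.items (bp_list.foldl gstep PySem.Dict.empty),
      (bp_list.foldl gstep PySem.Dict.empty).getD g.1 PySem.Set.empty = g.2 := by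
    intro g hg
    obtain ⟨ga, gb⟩ := g
    exact PySem.Dict.getD_of_mem_items _ hg hkn _
  have hmemv : ∀ g ∈ PySem.Dict.items (bp_list.foldl gstep PySem.Dict.empty),
      ∀ k : Int, k ∈ g.2 ↔ (k, g.1 - k) ∈ bp_list := by
    intro g hg k
    rw [← hval g hg, getD_gfold]
    simp [PySem.Dict.getD_empty]
  have hndv : ∀ g ∈ PySem.Dict.items (bp_list.foldl gstep PySem.Dict.empty),
      (g.2 : List Int).Nodup := by
    intro g hg
    rw [← hval g hg]
    exact nodup_gfold bp_list PySem.Dict.empty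
      (by intro s; simp [PySem.Dict.getD_empty]) g.1
  have hMS : ∀ g ∈ PySem.Dict.items (bp_list.foldl gstep PySem.Dict.empty),
      ∀ k : Int, ((k, g.1 - k) ∈ (PySem.Set.ofList bp_list : List (Int × Int)) ↔ k ∈ g.2) := by
    intro g hg k
    rw [PySem.Set.mem_ofList, hmemv g hg k]
  rw [List.mem_flatMap]
  constructor
  · rintro ⟨g, hg, hx⟩
    rw [chunk_spec (PySem.Set.ofList bp_list) g (hndv g hg) (hMS g hg)] at hx
    rw [List.mem_map] at hx
    obtain ⟨a, ha, hax⟩ := hx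
    rw [List.mem_filter] at ha
    obtain ⟨haM, hkeep⟩ := ha
    refine ⟨(a, g.1 - a), ?_, ?_, ?_⟩
    · rw [← hmemv g hg a]
      exact (PySem.List.mem_sorted _ _ _ _).mp haM
    · simp only [Bool.not_eq_true', decide_eq_false_iff_not] at hkeep
      unfold contp
      simp only
      rintro ⟨hm1, hm2⟩
      apply hkeep
      refine ⟨?_, by omega⟩
      rw [PySem.List.mem_sorted]
      rw [hmemv g hg (a - 1)]
      have : (a - 1, g.1 - (a - 1)) = (a - 1, g.1 - a + 1) := by
        rw [Prod.mk.injEq]; constructor <;> omega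
      rw [this]
      rw [← PySem.Set.mem_ofList bp_list]
      exact hm1
    · rw [← hax]
  · rintro ⟨p, hp, hc, hx⟩
    obtain ⟨pa, pb⟩ := p
    have hs : pa + pb ∈ (bp_list.foldl gstep PySem.Dict.empty).keys := by
      rw [keys_gfold, PySem.Set.mem_ofList, List.mem_map]
      exact ⟨(pa, pb), hp, rfl⟩
    rw [show (bp_list.foldl gstep PySem.Dict.empty).keys
        = (PySem.Dict.items (bp_list.foldl gstep PySem.Dict.empty)).map Prod.fst from rfl,
      List.mem_map] at hs
    obtain ⟨g, hg, hgs⟩ := hs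
    refine ⟨g, hg, ?_⟩
    rw [chunk_spec (PySem.Set.ofList bp_list) g (hndv g hg) (hMS g hg)]
    rw [List.mem_map]
    refine ⟨pa, ?_, ?_⟩
    · rw [List.mem_filter]
      constructor
      · rw [PySem.List.mem_sorted, hmemv g hg pa, hgs]
        have : (pa, pa + pb - pa) = (pa, pb) := by
          rw [Prod.mk.injEq]; constructor <;> omega
        rw [this]
        exact hp
      · simp only [Bool.not_eq_true', decide_eq_false_iff_not]
        rintro ⟨hm1, hm2⟩
        apply hc
        unfold contp
        simp only
        rw [PySem.List.mem_sorted, hmemv g hg (pa - 1), hgs] at hm1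
        constructor
        · have heq2 : (pa - 1, pb + 1) = (pa - 1, pa + pb - (pa - 1)) := by
            rw [Prod.mk.injEq]; constructor <;> omega
          rw [PySem.Set.mem_ofList, heq2]
          exact hm1
        · omega
    · rw [hx, hgs]
      have h1 : g.1 - pa = pb := by omega
      rw [hgs] at h1
      rw [h1]

lemma nodup_spans (bp_list : List (Int × Int)) :
    ((PySem.Dict.items (bp_list.foldl gstep PySem.Dict.empty)).flatMap chunk).Nodup := by
  have hkn := nodup_keys_gfold bp_list
  have hval : ∀ g ∈ PySem.Dict.items (bp_list.foldl gstep PySem.Dict.empty),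
      (bp_list.foldl gstep PySem.Dict.empty).getD g.1 PySem.Set.empty = g.2 := by
    rintro ⟨ga, gb⟩ hg
    exact PySem.Dict.getD_of_mem_items _ hg hkn _
  have hndv : ∀ g ∈ PySem.Dict.items (bp_list.foldl gstep PySem.Dict.empty),
      (g.2 : List Int).Nodup := by
    intro g hg
    rw [← hval g hg]
    exact nodup_gfold bp_list PySem.Dict.empty
      (by intro s; simp [PySem.Dict.getD_empty]) g.1
  have hMS : ∀ g ∈ PySem.Dict.items (bp_list.foldl gstep PySem.Dict.empty),
      ∀ k : Int, ((k, g.1 - k) ∈ (PySem.Set.ofList bp_list : List (Int × Int)) ↔ k ∈ g.2) := by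
    intro g hg k
    rw [PySem.Set.mem_ofList, ← hval g hg, getD_gfold]
    simp [PySem.Dict.getD_empty]
  have hsum : ∀ g ∈ PySem.Dict.items (bp_list.foldl gstep PySem.Dict.empty),
      ∀ x ∈ chunk g, x.1 + x.2.1 = g.1 := by
    intro g hg x hx
    rw [chunk_spec (PySem.Set.ofList bp_list) g (hndv g hg) (hMS g hg), List.mem_map] at hx
    obtain ⟨a, _, hax⟩ := hx
    rw [← hax]
    simp only
    omega
  rw [List.nodup_flatMap]
  constructor
  · intro g hg
    rw [chunk_spec (PySem.Set.ofList bp_list) g (hndv g hg) (hMS g hg)]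
    apply List.Nodup.map
    · intro a b hab
      simpa using congrArg (fun t => t.1) hab
    · exact ((PySem.List.sorted_perm g.2 (fun x => x) false).symm.nodup (hndv g hg)).filter _
  · have hpf : (PySem.Dict.items (bp_list.foldl gstep PySem.Dict.empty)).Pairwise
        (fun a b => a.1 ≠ b.1) := by
      have : ((PySem.Dict.items (bp_list.foldl gstep PySem.Dict.empty)).map Prod.fst).Nodup :=
        hkn
      rwa [List.Nodup, List.pairwise_map] at this
    apply List.Pairwise.imp_of_mem ?_ hpf
    intro g g' hg hg' hne x hx hx'
    have h1 := hsum g hg x hx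
    have h2 := hsum g' hg' x hx'
    exact hne (by omega)


lemma foldl_stepB_filter (S : List (Int × Int)) (L : List (Int × Int)) :
    ∀ acc, L.foldl (stepB S) acc = acc ++ (L.filter
      (fun p => !decide ((p.1 - 1, p.2 + 1) ∈ S ∧ p.2 > p.1))).map
      (fun p => (p.1, helWhileB S p.1 p.2)) := by
  induction L with
  | nil => intro acc; simp
  | cons p t ih =>
    intro acc
    simp only [List.foldl_cons, List.filter_cons]
    by_cases h : (p.1 - 1, p.2 + 1) ∈ S ∧ p.2 > p.1
    · rw [show stepB S acc p = acc from by unfold stepB; rw [if_pos h]]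
      rw [ih]
      simp [h]
    · rw [show stepB S acc p = acc ++ [(p.1, helWhileB S p.1 p.2)] from by
        unfold stepB; rw [if_neg h]]
      rw [ih]
      simp [h]

lemma qLt_ne {a b : Int × Int × Int} (h : qLt a b) : a ≠ b := by
  intro he
  subst he
  unfold qLt at h
  omega

lemma qLt_key_ne {a b : Int × Int × Int} (h : qLt a b) : (a.1, a.2.1) ≠ (b.1, b.2.1) := by
  intro he
  rw [Prod.mk.injEq] at he
  unfold qLt at h
  omega

theorem mid_eq_alt (bp_list : List (Int × Int)) :
    midScan bp_list = extract_helices_py_alt bp_list := by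
  rw [alt_eq]
  have hLpr := sorted2_pairwise (PySem.Set.ofList bp_list)
  have hLnd : (PySem.List.sorted2 (PySem.Set.ofList bp_list) Prod.fst Prod.snd).Nodup :=
    (PySem.List.sorted2_perm _ _ _ _).symm.nodup (PySem.Set.nodup_ofList bp_list)
  have hLlt := pairwise_lt_of_pairwise_pR_nodup hLpr hLnd
  have hTlt : (((PySem.List.sorted2 (PySem.Set.ofList bp_list) Prod.fst Prod.snd).filter
      (fun p => !decide ((p.1 - 1, p.2 + 1) ∈ (PySem.Set.ofList bp_list : List (Int × Int))
        ∧ p.2 > p.1))).map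
      (fun p => (p.1, p.2, helWhileB (PySem.Set.ofList bp_list) p.1 p.2))).Pairwise qLt := by
    rw [List.pairwise_map]
    apply List.Pairwise.imp ?_ (hLlt.filter _)
    intro a b hab
    unfold pLt at hab
    unfold qLt
    simpa using hab
  have hTnd : (((PySem.List.sorted2 (PySem.Set.ofList bp_list) Prod.fst Prod.snd).filter
      (fun p => !decide ((p.1 - 1, p.2 + 1) ∈ (PySem.Set.ofList bp_list : List (Int × Int))
        ∧ p.2 > p.1))).map
      (fun p => (p.1, p.2, helWhileB (PySem.Set.ofList bp_list) p.1 p.2))).Nodup :=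
    hTlt.imp qLt_ne
  have hmemT : ∀ x : Int × Int × Int,
      x ∈ ((PySem.List.sorted2 (PySem.Set.ofList bp_list) Prod.fst Prod.snd).filter
        (fun p => !decide ((p.1 - 1, p.2 + 1) ∈ (PySem.Set.ofList bp_list : List (Int × Int))
          ∧ p.2 > p.1))).map
        (fun p => (p.1, p.2, helWhileB (PySem.Set.ofList bp_list) p.1 p.2)) ↔
      ∃ p : Int × Int, p ∈ bp_list ∧ ¬ contp (PySem.Set.ofList bp_list) p ∧
        x = (p.1, p.2, helWhileB (PySem.Set.ofList bp_list) p.1 p.2) := by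
    intro x
    rw [List.mem_map]
    constructor
    · rintro ⟨p, hp, hpx⟩
      rw [List.mem_filter] at hp
      obtain ⟨hp1, hp2⟩ := hp
      simp only [Bool.not_eq_true', decide_eq_false_iff_not] at hp2
      refine ⟨p, ?_, hp2, hpx.symm⟩
      rw [← PySem.Set.mem_ofList bp_list]
      exact ((PySem.List.sorted2_perm _ _ _ _).mem_iff).mp hp1
    · rintro ⟨p, hp1, hp2, hpx⟩
      refine ⟨p, ?_, hpx.symm⟩
      rw [List.mem_filter]
      constructor
      · rw [(PySem.List.sorted2_perm _ _ _ _).mem_iff, PySem.Set.mem_ofList]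
        exact hp1
      · simp only [Bool.not_eq_true', decide_eq_false_iff_not]
        exact hp2
  have hperm : ((PySem.Dict.items (bp_list.foldl gstep PySem.Dict.empty)).flatMap chunk).Perm
      (((PySem.List.sorted2 (PySem.Set.ofList bp_list) Prod.fst Prod.snd).filter
        (fun p => !decide ((p.1 - 1, p.2 + 1) ∈ (PySem.Set.ofList bp_list : List (Int × Int))
          ∧ p.2 > p.1))).map
        (fun p => (p.1, p.2, helWhileB (PySem.Set.ofList bp_list) p.1 p.2))) := by
    rw [List.perm_ext_iff_of_nodup (nodup_spans bp_list) hTnd]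
    intro x
    rw [mem_spans, hmemT]
  have hperm2 := (PySem.List.sorted2_perm
      ((PySem.Dict.items (bp_list.foldl gstep PySem.Dict.empty)).flatMap chunk)
      (fun t => t.1) (fun t => t.2.1) false).trans hperm
  have hspr := sorted2_pairwise3
      ((PySem.Dict.items (bp_list.foldl gstep PySem.Dict.empty)).flatMap chunk)
  have hkeynd : ((PySem.List.sorted2
      ((PySem.Dict.items (bp_list.foldl gstep PySem.Dict.empty)).flatMap chunk)
      (fun t => t.1) (fun t => t.2.1)).map (fun t => (t.1, t.2.1))).Nodup := by
    apply (hperm2.map (fun t => (t.1, t.2.1))).symm.nodup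
    rw [List.Nodup, List.pairwise_map]
    exact hTlt.imp qLt_key_ne
  have hslt : (PySem.List.sorted2
      ((PySem.Dict.items (bp_list.foldl gstep PySem.Dict.empty)).flatMap chunk)
      (fun t => t.1) (fun t => t.2.1)).Pairwise qLt := by
    rw [List.Nodup, List.pairwise_map] at hkeynd
    apply List.Pairwise.imp ?_ (hspr.and hkeynd)
    rintro a b ⟨h1, h2⟩
    rw [qR_iff] at h1
    rw [Ne, Prod.mk.injEq] at h2
    unfold qLt at *
    omega
  have hsv : PySem.List.sorted2
      ((PySem.Dict.items (bp_list.foldl gstep PySem.Dict.empty)).flatMap chunk)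
      (fun t => t.1) (fun t => t.2.1) =
      ((PySem.List.sorted2 (PySem.Set.ofList bp_list) Prod.fst Prod.snd).filter
        (fun p => !decide ((p.1 - 1, p.2 + 1) ∈ (PySem.Set.ofList bp_list : List (Int × Int))
          ∧ p.2 > p.1))).map
        (fun p => (p.1, p.2, helWhileB (PySem.Set.ofList bp_list) p.1 p.2)) := by
    refine List.Perm.eq_of_pairwise ?_ hslt hTlt hperm2
    intro a b _ _ h1 h2
    exfalso
    unfold qLt at *
    omega
  rw [hsv]
  unfold midScan
  rw [foldl_stepB_filter]
  rw [List.map_map]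
  rfl

-- ===== VERDICT (by name: the statement is the Claim_ definition above) =====
theorem extract_helices_py_spec : Claim_equal_extract_helices_py := by
  intro bp_list _
  unfold Spec_extract_helices_py
  rw [A_eq_mid, mid_eq_alt]
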